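-- pv_equiv track=rewrite | github.com/XuZhang99/dynamo | tests/parity/parser/generate_parity_chart.py | _build_display_groups
-- ===== SOURCE A (Python) =====
-- TOP_N_FAMILIES = [
--     "deepseek_v4",
--     "gemma4",
--     "glm47",
--     "harmony",
--     "kimi_k2",
--     "minimax_m2",
--     "qwen3_coder",
-- ]
--
-- def _build_display_groups(
--     cases: dict, labels: dict[str, str]
-- ) -> tuple[list[tuple[str, str]], list[tuple[str, str]]]:
--     """Return `(top_n, others)` as `[(label, family), ...]` lists.
--
--     Top-N: families listed in `TOP_N_FAMILIES`, in that exact order.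
--     Others: every YAML-discovered family not in TOP_N, sorted by label.
--     Missing labels fall back to the family ID.
--     """
--     families = {fam for fam, _ in cases.keys()}
--
--     def label_of(fam: str) -> str:
--         return labels.get(fam, fam)
--
--     top_n = [(label_of(f), f) for f in TOP_N_FAMILIES if f in families]
--     other_fams = sorted(
--         families - set(TOP_N_FAMILIES), key=lambda f: label_of(f).lower()
--     )
--     others = [(label_of(f), f) for f in other_fams]
--     return top_n, others
-- ===== SOURCE B (Python) =====
-- TOP_N_FAMILIES = [
--     "deepseek_v4",
--     "gemma4",
--     "glm47",
--     "harmony",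
--     "kimi_k2",
--     "minimax_m2",
--     "qwen3_coder",
-- ]
--
--
-- def _build_display_groups(cases, labels):
--     """One composite-key sort over all candidate families, then a single partitioning pass."""
--     families = {fam for fam, _ in cases}
--     n = len(TOP_N_FAMILIES)
--
--     def sort_key(fam):
--         if fam in TOP_N_FAMILIES:
--             return (TOP_N_FAMILIES.index(fam), "")
--         return (n, labels.get(fam, fam).lower())
--
--     candidates = TOP_N_FAMILIES + list(families - set(TOP_N_FAMILIES))
--     top_n, others = [], []
--     for fam in sorted(candidates, key=sort_key):
--         if fam in TOP_N_FAMILIES: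
--             if fam in families:
--                 top_n.append((labels.get(fam, fam), fam))
--         else:
--             others.append((labels.get(fam, fam), fam))
--     return top_n, others
-- ===== Notes on version B (the rewrite author's own statement) =====
-- stated objective: alternative
-- what changed: Replaces A's two separate passes (an ordered membership filter over TOP_N_FAMILIES plus a sort of the set difference) by one composite-key sort of the whole family set followed by a single partitioning walk that emits both lists.
import Mathlib
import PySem

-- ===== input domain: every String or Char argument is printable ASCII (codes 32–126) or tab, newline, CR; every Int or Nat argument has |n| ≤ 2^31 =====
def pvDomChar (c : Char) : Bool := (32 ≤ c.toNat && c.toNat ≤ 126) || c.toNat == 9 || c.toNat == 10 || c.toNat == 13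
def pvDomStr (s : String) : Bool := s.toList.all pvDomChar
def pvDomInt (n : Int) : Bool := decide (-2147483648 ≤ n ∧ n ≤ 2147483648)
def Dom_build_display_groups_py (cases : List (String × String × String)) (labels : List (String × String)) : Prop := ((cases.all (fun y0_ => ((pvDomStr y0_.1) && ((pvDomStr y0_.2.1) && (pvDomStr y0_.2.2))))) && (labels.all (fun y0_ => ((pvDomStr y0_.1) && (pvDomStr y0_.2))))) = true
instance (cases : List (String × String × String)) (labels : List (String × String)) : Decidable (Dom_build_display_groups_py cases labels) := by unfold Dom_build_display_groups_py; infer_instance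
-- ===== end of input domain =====

-- B replaces A's two passes (ordered TOP_N filter + sort of the set difference) by ONE composite-key
-- sort of the whole family set followed by a single partitioning walk; same cost, different decomposition.

-- the module constant TOP_N_FAMILIES (shared by both Pythons)
def pvTopN : List String :=
  ["deepseek_v4", "gemma4", "glm47", "harmony", "kimi_k2", "minimax_m2", "qwen3_coder"]

-- ===== PORT A =====
def build_display_groups_py (cases : List (String × String × String)) (labels : List (String × String)) : (List (String × String)) × (List (String × String)) :=
  let families : PySem.Set String := PySem.Set.ofList (cases.map (fun c => c.1))
  let label_of : String → String := fun fam => PySem.Dict.getD (PySem.Dict.mk labels) fam fam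
  let top_n : List (String × String) :=
    (pvTopN.filter (fun f => PySem.Set.contains families f)).map (fun f => (label_of f, f))
  let other_fams : List String :=
    PySem.List.sorted (PySem.Set.diff families (PySem.Set.ofList pvTopN))
      (fun f => PySem.Str.lower (label_of f)) false
  let others : List (String × String) := other_fams.map (fun f => (label_of f, f))
  (top_n, others)

-- ===== PORT B =====
-- sort_key fam: (TOP_N_FAMILIES.index(fam), "") if fam in TOP_N_FAMILIES else (n, labels.get(fam, fam).lower())
-- (index? is guarded by the membership test, so the .getD 0 default is never taken on the else-free branch)
def pvSortKey1 (fam : String) : Int :=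
  if pvTopN.contains fam then (((PySem.List.index? pvTopN fam).getD 0 : Nat) : Int)
  else (pvTopN.length : Int)

def pvSortKey2 (labels : List (String × String)) (fam : String) : String :=
  if pvTopN.contains fam then ""
  else PySem.Str.lower (PySem.Dict.getD (PySem.Dict.mk labels) fam fam)

def build_display_groups_py_alt (cases : List (String × String × String)) (labels : List (String × String)) : (List (String × String)) × (List (String × String)) :=
  let families : PySem.Set String := PySem.Set.ofList (cases.map (fun c => c.1))
  let candidates : List String := pvTopN ++ PySem.Set.diff families (PySem.Set.ofList pvTopN)
  let ordered : List String := PySem.List.sorted2 candidates pvSortKey1 (pvSortKey2 labels) false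
  ordered.foldl
    (fun acc fam =>
      if pvTopN.contains fam then
        (if PySem.Set.contains families fam then
          (acc.1 ++ [(PySem.Dict.getD (PySem.Dict.mk labels) fam fam, fam)], acc.2)
         else acc)
      else (acc.1, acc.2 ++ [(PySem.Dict.getD (PySem.Dict.mk labels) fam fam, fam)]))
    ([], [])

-- ===== PRECONDITION & SPEC =====
-- Pre_ excludes inputs where two distinct non-TOP_N families share the same lowercased label: there the
-- tie order among "others" is CPython's hash-dependent set iteration order, which neither port models.
def Pre_build_display_groups_py (cases : List (String × String × String)) (labels : List (String × String)) : Prop :=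
  (PySem.Set.diff (PySem.Set.ofList (cases.map (fun c => c.1))) (PySem.Set.ofList pvTopN)).Pairwise
    (fun a b => PySem.Str.lower (PySem.Dict.getD (PySem.Dict.mk labels) a a)
              ≠ PySem.Str.lower (PySem.Dict.getD (PySem.Dict.mk labels) b b))
instance (cases : List (String × String × String)) (labels : List (String × String)) : Decidable (Pre_build_display_groups_py cases labels) := by unfold Pre_build_display_groups_py; infer_instance

def pvWitness_build_display_groups_py : (List (String × String × String)) × (List (String × String)) :=
  ([("glm47", "case1", "ok"), ("zeta", "case2", "ok")], [("zeta", "Zeta Family")])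

def Spec_build_display_groups_py (cases : List (String × String × String)) (labels : List (String × String)) (out : (List (String × String)) × (List (String × String))) : Prop := out = build_display_groups_py_alt cases labels
instance (cases : List (String × String × String)) (labels : List (String × String)) (out : (List (String × String)) × (List (String × String))) : Decidable (Spec_build_display_groups_py cases labels out) := by unfold Spec_build_display_groups_py; infer_instance

-- ===== CLAIM (what is proved, stated in full; the proofs are below) =====
def Claim_equal_build_display_groups_py : Prop := ∀ (cases : List (String × String × String)) (labels : List (String × String)), Dom_build_display_groups_py cases labels → Pre_build_display_groups_py cases labels → Spec_build_display_groups_py cases labels (build_display_groups_py cases labels)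

-- ===== LEMMAS AND PROOFS =====

-- sorted2 with an (Int, String) tuple key is sorted with the lexicographic key
theorem pv_sorted2_eq_sorted_lex {α : Type} (xs : List α) (k1 : α → Int) (k2 : α → String) :
    PySem.List.sorted2 xs k1 k2 false
      = PySem.List.sorted xs (fun x => toLex (k1 x, k2 x)) false := by
  unfold PySem.List.sorted2 PySem.List.sorted
  have hb : (fun a b => decide (k1 a < k1 b) || (!decide (k1 b < k1 a) && decide (k2 a < k2 b)))
      = (fun a b => decide ((toLex (k1 a, k2 a) : Lex (Int × String)) < toLex (k1 b, k2 b))) := by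
    funext a b
    rw [Bool.eq_iff_iff]
    simp only [Bool.or_eq_true, Bool.and_eq_true, Bool.not_eq_true', decide_eq_true_eq,
      decide_eq_false_iff_not, not_lt, Prod.Lex.lt_iff]
    constructor
    · rintro (h | ⟨hle, h2⟩)
      · exact Or.inl h
      · rcases lt_or_eq_of_le hle with h | h
        · exact Or.inl h
        · exact Or.inr ⟨h, h2⟩
    · rintro (h | ⟨he, h2⟩)
      · exact Or.inl h
      · exact Or.inr ⟨le_of_eq he, h2⟩
  simp only [if_neg (by simp : ¬ (false = true))]
  rw [hb]

theorem pvTopN_key1_pairwise : pvTopN.Pairwise (fun a b => pvSortKey1 a < pvSortKey1 b) := by decide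

theorem pvTopN_key1_lt_seven : ∀ f ∈ pvTopN, pvSortKey1 f < 7 := by decide

theorem pvSortKey1_of_not_mem {f : String} (hf : f ∉ pvTopN) : pvSortKey1 f = 7 := by
  have h : pvTopN.contains f = false := by simp [hf]
  simp only [pvSortKey1, h, Bool.false_eq_true, if_false]
  decide

theorem pvSortKey2_of_not_mem (labels : List (String × String)) {f : String} (hf : f ∉ pvTopN) :
    pvSortKey2 labels f = PySem.Str.lower (PySem.Dict.getD (PySem.Dict.mk labels) f f) := by
  have h : pvTopN.contains f = false := by simp [hf]
  simp only [pvSortKey2, h, Bool.false_eq_true, if_false]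

-- ===== VERDICT (by name: the statement is the Claim_ definition above) =====
theorem build_display_groups_py_spec : Claim_equal_build_display_groups_py := by
  intro cases labels _hdom hpre
  unfold Spec_build_display_groups_py build_display_groups_py build_display_groups_py_alt
  set fams : PySem.Set String := PySem.Set.ofList (cases.map (fun c => c.1)) with hfams
  set lab : String → String := fun f => PySem.Dict.getD (PySem.Dict.mk labels) f f with hlab
  set keyO : String → String := fun f => PySem.Str.lower (lab f) with hkeyO
  set diffL : List String := PySem.Set.diff fams (PySem.Set.ofList pvTopN) with hdiff
  set O : List String := PySem.List.sorted diffL keyO false with hO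
  have hdiff_mem : ∀ a, a ∈ diffL ↔ a ∈ fams ∧ a ∉ pvTopN := by
    intro a
    rw [hdiff]
    unfold PySem.Set.diff
    simp [List.mem_filter, PySem.Set.contains, PySem.Set.mem_ofList]
  have hO_mem : ∀ a, a ∈ O ↔ a ∈ diffL := by
    intro a
    exact (PySem.List.sorted_perm diffL keyO false).mem_iff
  -- B's single sort produces exactly pvTopN ++ O
  have hperm : (pvTopN ++ O).Perm (pvTopN ++ diffL) :=
    List.Perm.append_left pvTopN (PySem.List.sorted_perm diffL keyO false)
  have hpw : (pvTopN ++ O).Pairwise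
      (fun a b => (toLex (pvSortKey1 a, pvSortKey2 labels a) : Lex (Int × String))
                < toLex (pvSortKey1 b, pvSortKey2 labels b)) := by
    rw [List.pairwise_append]
    refine ⟨?_, ?_, ?_⟩
    · -- inside pvTopN: first components strictly increase
      exact pvTopN_key1_pairwise.imp (fun h => Prod.Lex.lt_iff.2 (Or.inl h))
    · -- inside O: first components both 7, second strictly increase
      have hle : O.Pairwise (fun a b => keyO a ≤ keyO b) :=
        PySem.List.sorted_pairwise diffL keyO
      have hne : O.Pairwise (fun a b => keyO a ≠ keyO b) := by
        have h := hpre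
        unfold Pre_build_display_groups_py at h
        exact h.perm (PySem.List.sorted_perm diffL keyO false).symm
          (fun h' => fun he => h' he.symm)
      refine List.Pairwise.imp_of_mem ?_ (hle.and hne)
      intro a b ha hb hab
      have hant : a ∉ pvTopN := ((hdiff_mem a).1 ((hO_mem a).1 ha)).2
      have hbnt : b ∉ pvTopN := ((hdiff_mem b).1 ((hO_mem b).1 hb)).2
      refine Prod.Lex.lt_iff.2 (Or.inr ⟨?_, ?_⟩)
      · simp [pvSortKey1_of_not_mem hant, pvSortKey1_of_not_mem hbnt]
      · rw [pvSortKey2_of_not_mem labels hant, pvSortKey2_of_not_mem labels hbnt]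
        exact lt_of_le_of_ne hab.1 hab.2
    · -- across: every top key is below every other key
      intro a ha b hb
      have hbnt : b ∉ pvTopN := ((hdiff_mem b).1 ((hO_mem b).1 hb)).2
      refine Prod.Lex.lt_iff.2 (Or.inl ?_)
      rw [pvSortKey1_of_not_mem hbnt]
      exact pvTopN_key1_lt_seven a ha
  have hordered : PySem.List.sorted2 (pvTopN ++ diffL) pvSortKey1 (pvSortKey2 labels) false
      = pvTopN ++ O := by
    rw [pv_sorted2_eq_sorted_lex]
    exact PySem.List.sorted_eq_of_perm_of_pairwise_lt _ _ _ hperm hpw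
  simp only [← hdiff, ← hkeyO, ← hO]
  simp only [hordered]
  rw [List.foldl_append]
  -- the fold over pvTopN emits exactly A's top_n list
  have hfoldT :
      pvTopN.foldl (fun acc fam =>
          if pvTopN.contains fam then
            (if PySem.Set.contains fams fam then (acc.1 ++ [(lab fam, fam)], acc.2) else acc)
          else (acc.1, acc.2 ++ [(lab fam, fam)]))
        (([], []) : List (String × String) × List (String × String))
        = ((pvTopN.filter (fun f => PySem.Set.contains fams f)).map (fun f => (lab f, f)), []) := by
    have hc : ∀ (acc : List (String × String) × List (String × String)), ∀ x ∈ pvTopN,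
        (if pvTopN.contains x then
            (if PySem.Set.contains fams x then (acc.1 ++ [(lab x, x)], acc.2) else acc)
         else (acc.1, acc.2 ++ [(lab x, x)]))
          = (if PySem.Set.contains fams x then acc.1 ++ [(lab x, x)] else acc.1, acc.2) := by
      intro acc x hx
      simp only [List.contains_iff_mem.2 hx, if_true]
      split <;> simp
    rw [PySem.List.foldl_congr_mem _ _ _ _ hc,
      PySem.List.foldl_prod_mk
        (f := fun s fam => if PySem.Set.contains fams fam then s ++ [(lab fam, fam)] else s)
        (g := fun s _ => s),
      PySem.List.foldl_append_if (fun f => PySem.Set.contains fams f) (fun f => (lab f, f)),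
      PySem.List.foldl_ignore]
    simp
  -- the fold over O emits exactly A's others list
  have hfoldO : ∀ (X : List (String × String)),
      O.foldl (fun acc fam =>
          if pvTopN.contains fam then
            (if PySem.Set.contains fams fam then (acc.1 ++ [(lab fam, fam)], acc.2) else acc)
          else (acc.1, acc.2 ++ [(lab fam, fam)]))
        ((X, []) : List (String × String) × List (String × String))
        = (X, O.map (fun f => (lab f, f))) := by
    intro X
    have hc : ∀ (acc : List (String × String) × List (String × String)), ∀ x ∈ O,
        (if pvTopN.contains x then
            (if PySem.Set.contains fams x then (acc.1 ++ [(lab x, x)], acc.2) else acc)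
         else (acc.1, acc.2 ++ [(lab x, x)]))
          = (acc.1, acc.2 ++ [(lab x, x)]) := by
      intro acc x hx
      have hm : x ∉ pvTopN := ((hdiff_mem x).1 ((hO_mem x).1 hx)).2
      simp [hm]
    rw [PySem.List.foldl_congr_mem _ _ _ _ hc,
      PySem.List.foldl_prod_mk (f := fun s _ => s) (g := fun s fam => s ++ [(lab fam, fam)]),
      PySem.List.foldl_append_singleton_eq_map, PySem.List.foldl_ignore]
    simp
  rw [hfoldT, hfoldO]
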